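-- pv_equiv track=rewrite | github.com/drsahin/HacerRank--Python | Swap II.py | tran
-- ===== SOURCE A (Python) =====
-- def change(s,indx1,indx2):
--   res=''
--   for i in range(len(s)):
--     if i== indx1:
--       res += s[indx2]
--     elif i== indx2:
--       res += s[indx1]
--     else:
--       res += s[i]
--   return res
--
-- def tran(s):
--   arr=[]
--   for i in range(len(s)):
--     if s[i] in '0123456789':
--       arr.append(i)
--   if len(arr)<2:
--     return s
--   for i in range(arr[0]+1, arr[1]):
--     if (s[i]>="a" and s[i]<="z") or (s[i]>="A" and s[i]<="Z"):
--       return change(s, arr[0], arr[1])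
--   else:
--     return s
-- ===== SOURCE B (Python) =====
-- def tran(s):
--     n = len(s)
--     # phase 1: scan for the index of the first digit
--     i = 0
--     while i < n and s[i] not in '0123456789':
--         i += 1
--     # phase 2: continue from i+1, tracking ASCII letters, until a second digit
--     letter = False
--     j = i + 1
--     while j < n and s[j] not in '0123456789':
--         if ('a' <= s[j] <= 'z') or ('A' <= s[j] <= 'Z'):
--             letter = True
--         j += 1
--     if j >= n:
--         return s
--     if letter:
--         return s[:i] + s[j] + s[i + 1:j] + s[i] + s[j + 1:]
--     return s
-- ===== Notes on version B (the rewrite author's own statement) =====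
-- stated objective: simpler
-- what changed: B replaces A's full digit-index-list pass plus the char-by-char change() rebuild with a single early-stopping scan (first digit, letter flag, second digit) and a slicing-based swap.
import Mathlib
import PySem

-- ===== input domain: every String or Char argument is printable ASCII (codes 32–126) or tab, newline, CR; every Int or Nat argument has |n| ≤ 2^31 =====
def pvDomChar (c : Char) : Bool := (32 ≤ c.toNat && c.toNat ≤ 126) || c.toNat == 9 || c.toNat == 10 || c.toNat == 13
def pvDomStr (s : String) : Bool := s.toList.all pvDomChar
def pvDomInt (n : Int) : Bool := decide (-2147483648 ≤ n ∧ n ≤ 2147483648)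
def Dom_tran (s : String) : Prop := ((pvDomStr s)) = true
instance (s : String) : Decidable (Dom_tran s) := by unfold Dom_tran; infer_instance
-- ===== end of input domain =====

-- B fuses A's two passes and its char-by-char change() rebuild into one early-stopping scan plus a slicing swap; objective: simpler.

-- shared character tests (`c in '0123456789'` and `('a'<=c<='z') or ('A'<=c<='Z')`), identical in A and B
def pvIsDig (c : Char) : Bool := ("0123456789".toList).contains c
def pvIsLet (c : Char) : Bool := ('a' ≤ c && c ≤ 'z') || ('A' ≤ c && c ≤ 'Z')

-- ===== PORT A =====
-- helper change(s, indx1, indx2): builds res char by char over range(len(s));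
-- every index used is in range, so Python s[i] is exact as getD.
def pvChange (cs : List Char) (indx1 indx2 : Nat) : List Char :=
  (List.range cs.length).foldl (fun res i =>
    if i = indx1 then res ++ [cs.getD indx2 ' ']
    else if i = indx2 then res ++ [cs.getD indx1 ' ']
    else res ++ [cs.getD i ' ']) []

-- tran: collect all digit indices, then scan range(arr[0]+1, arr[1]) for a letter.
-- range(a,b) with 0 ≤ a ≤ b is exact as List.range' a (b-a).
def tran (s : String) : String :=
  let cs := s.toList
  let arr := (List.range cs.length).foldl
    (fun arr i => if pvIsDig (cs.getD i ' ') then arr ++ [i] else arr) []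
  if arr.length < 2 then s
  else
    let i1 := arr.getD 0 0
    let i2 := arr.getD 1 0
    if (List.range' (i1+1) (i2 - (i1+1))).any (fun i => pvIsLet (cs.getD i ' '))
    then String.ofList (pvChange cs i1 i2)
    else s

-- ===== PORT B =====
-- phase-1 while loop: first index (scanning the suffix from offset k) holding a digit; k + length if none
-- phase-2 while loop: scan on for the next digit, accumulating the letter flag
def pvFirstDig : List Char → Nat → Nat
  | [], k => k
  | c :: r, k => if pvIsDig c then k else pvFirstDig r (k+1)

def pvScan2 : List Char → Nat → Bool → Nat × Bool
  | [], k, b => (k, b)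
  | c :: r, k, b => if pvIsDig c then (k, b) else pvScan2 r (k+1) (b || pvIsLet c)

-- the slices s[:i], s[i+1:j], s[j+1:] have nonnegative in-range bounds, exact as take/drop
def tran_alt (s : String) : String :=
  let cs := s.toList
  let i := pvFirstDig cs 0
  let (j, letter) := pvScan2 (cs.drop (i+1)) (i+1) false
  if cs.length ≤ j then s
  else if letter then
    String.ofList (cs.take i ++ [cs.getD j ' '] ++ (cs.drop (i+1)).take (j - (i+1))
               ++ [cs.getD i ' '] ++ cs.drop (j+1))
  else s

-- ===== PRECONDITION & SPEC =====
def Spec_tran (s : String) (out : String) : Prop := out = tran_alt s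
instance (s : String) (out : String) : Decidable (Spec_tran s out) := by unfold Spec_tran; infer_instance

-- ===== CLAIM (what is proved, stated in full; the proofs are below) =====
def Claim_equal_tran : Prop := ∀ (s : String), Dom_tran s → Spec_tran s (tran s)

-- ===== LEMMAS AND PROOFS =====

def pvDIdx : List Char → Nat → List Nat
  | [], _ => []
  | c :: r, k => if pvIsDig c then k :: pvDIdx r (k+1) else pvDIdx r (k+1)

-- segment map: indices a..a+m-1 read from cs give the middle slice
theorem pvMapSeg (cs : List Char) (m : Nat) : ∀ a, a + m ≤ cs.length →
    (List.range' a m).map (fun t => cs.getD t ' ') = (cs.drop a).take m := by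
  induction m with
  | zero => intro a _; simp
  | succ m ih =>
    intro a h
    have ha : a < cs.length := by omega
    rw [List.range'_succ, List.map_cons, ih (a+1) (by omega),
        List.drop_eq_getElem_cons ha, List.take_succ_cons]
    simp [List.getD_eq_getElem?_getD, List.getElem?_eq_getElem ha]

theorem pvArr_gen (cs : List Char) (r : List Char) : ∀ (k : Nat) (acc : List Nat), r = cs.drop k →
    (List.range' k r.length).foldl
      (fun arr i => if pvIsDig (cs.getD i ' ') then arr ++ [i] else arr) acc
      = acc ++ pvDIdx r k := by
  induction r with
  | nil => intro k acc _; simp [pvDIdx]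
  | cons c rr ih =>
    intro k acc hr
    have hk : k < cs.length := by
      by_contra h
      rw [List.drop_of_length_le (by omega)] at hr; exact (List.cons_ne_nil _ _) hr
    have hck : cs.getD k ' ' = c := by
      have : cs.getD k ' ' = (cs.drop k).getD 0 ' ' := by
        simp [List.getD_eq_getElem?_getD, List.getElem?_drop]
      rw [this, ← hr]; rfl
    have hrr : rr = cs.drop (k+1) := by
      have := congrArg List.tail hr; simpa [List.tail_drop] using this
    rw [List.length_cons, List.range'_succ, List.foldl_cons, hck]
    simp only [pvDIdx]
    by_cases hd : pvIsDig c
    · rw [if_pos hd, if_pos hd, ih (k+1) (acc ++ [k]) hrr, List.append_assoc]; rfl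
    · rw [if_neg hd, if_neg hd, ih (k+1) acc hrr]

theorem pvDIdx_mem {cs : List Char} {k x : Nat} (h : x ∈ pvDIdx cs k) :
    k ≤ x ∧ x < k + cs.length := by
  induction cs generalizing k with
  | nil => simp [pvDIdx] at h
  | cons c r ih =>
    simp only [pvDIdx] at h
    split at h
    · rcases List.mem_cons.mp h with rfl | h
      · simp only [List.length_cons]; omega
      · have := ih h; simp only [List.length_cons]; omega
    · have := ih h; simp only [List.length_cons]; omega

theorem pvFirstDig_spec (cs : List Char) : ∀ (k : Nat),
    (pvDIdx cs k = [] ∧ pvFirstDig cs k = k + cs.length) ∨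
    (∃ i rest, pvDIdx cs k = i :: rest ∧ pvFirstDig cs k = i ∧ k ≤ i ∧ i - k < cs.length ∧
      pvDIdx (cs.drop (i - k + 1)) (i + 1) = rest) := by
  induction cs with
  | nil => intro k; left; exact ⟨rfl, by simp [pvFirstDig]⟩
  | cons c r ih =>
    intro k
    by_cases hd : pvIsDig c
    · right
      refine ⟨k, pvDIdx r (k+1), by simp [pvDIdx, hd], by simp [pvFirstDig, hd], le_refl k, by simp, ?_⟩
      simp
    · rcases ih (k+1) with ⟨h1, h2⟩ | ⟨i, rest, h1, h2, h3, h4, h5⟩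
      · left
        refine ⟨by simp [pvDIdx, hd, h1], ?_⟩
        have hstep : pvFirstDig (c :: r) k = pvFirstDig r (k+1) := by simp [pvFirstDig, hd]
        rw [hstep, h2, List.length_cons]; omega
      · right
        refine ⟨i, rest, by simp [pvDIdx, hd, h1], by simp [pvFirstDig, hd, h2], by omega,
          by simp only [List.length_cons]; omega, ?_⟩
        have harith : i - k + 1 = (i - (k+1) + 1) + 1 := by omega
        rw [harith, List.drop_succ_cons]
        exact h5

theorem pvScan2_spec (cs : List Char) : ∀ (k : Nat) (b : Bool),
    (pvDIdx cs k = [] ∧ pvScan2 cs k b = (k + cs.length, b || cs.any pvIsLet)) ∨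
    (∃ j rest, pvDIdx cs k = j :: rest ∧ k ≤ j ∧
      pvScan2 cs k b = (j, b || ((cs.take (j - k)).any pvIsLet))) := by
  induction cs with
  | nil => intro k b; left; exact ⟨rfl, by simp [pvScan2]⟩
  | cons c r ih =>
    intro k b
    by_cases hd : pvIsDig c
    · right
      exact ⟨k, pvDIdx r (k+1), by simp [pvDIdx, hd], le_refl k, by simp [pvScan2, hd]⟩
    · rcases ih (k+1) (b || pvIsLet c) with ⟨h1, h2⟩ | ⟨j, rest, h1, h2, h3⟩
      · left
        refine ⟨by simp [pvDIdx, hd, h1], ?_⟩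
        have hstep : pvScan2 (c :: r) k b = pvScan2 r (k+1) (b || pvIsLet c) := by
          simp [pvScan2, hd]
        rw [hstep, h2, Prod.mk.injEq]
        refine ⟨by simp only [List.length_cons]; omega, by simp [Bool.or_assoc]⟩
      · right
        refine ⟨j, rest, by simp [pvDIdx, hd, h1], by omega, ?_⟩
        have hstep : pvScan2 (c :: r) k b = pvScan2 r (k+1) (b || pvIsLet c) := by
          simp [pvScan2, hd]
        rw [hstep, h3]
        have harith : j - k = (j - (k+1)) + 1 := by omega
        rw [harith, List.take_succ_cons]
        simp [Bool.or_assoc]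

theorem pvRange'_any (cs : List Char) (a m : Nat) (h : a + m ≤ cs.length) :
    (List.range' a m).any (fun i => pvIsLet (cs.getD i ' ')) = ((cs.drop a).take m).any pvIsLet := by
  rw [← pvMapSeg cs m a h, List.any_map]
  rfl

theorem pvChange_eq (cs : List Char) (i j : Nat) (hij : i < j) (hj : j < cs.length) :
    pvChange cs i j =
      cs.take i ++ [cs.getD j ' '] ++ (cs.drop (i+1)).take (j - (i+1))
        ++ [cs.getD i ' '] ++ cs.drop (j+1) := by
  have hfun : (fun (res : List Char) (t : Nat) =>
      if t = i then res ++ [cs.getD j ' ']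
      else if t = j then res ++ [cs.getD i ' ']
      else res ++ [cs.getD t ' ']) = (fun res t => res ++
        [if t = i then cs.getD j ' ' else if t = j then cs.getD i ' ' else cs.getD t ' ']) := by
    funext res t; split_ifs <;> rfl
  have hmap : pvChange cs i j = (List.range cs.length).map
      (fun t => if t = i then cs.getD j ' ' else if t = j then cs.getD i ' ' else cs.getD t ' ') := by
    rw [pvChange, hfun, PySem.List.foldl_append_singleton_eq_map, List.nil_append]
  set g := fun t => if t = i then cs.getD j ' ' else if t = j then cs.getD i ' ' else cs.getD t ' ' with hg
  have hsplit : List.range cs.length =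
      List.range' 0 i ++ List.range' i 1 ++ List.range' (i+1) (j-(i+1))
        ++ List.range' j 1 ++ List.range' (j+1) (cs.length-(j+1)) := by
    apply Eq.symm
    rw [show List.range' i 1 = List.range' (0+i) 1 from by rw [Nat.zero_add],
        List.range'_append_1,
        show List.range' (i+1) (j-(i+1)) = List.range' (0+(i+1)) (j-(i+1)) from by rw [Nat.zero_add],
        List.range'_append_1,
        show (i+1) + (j-(i+1)) = j from by omega,
        show List.range' j 1 = List.range' (0+j) 1 from by rw [Nat.zero_add],
        List.range'_append_1,
        show List.range' (j+1) (cs.length-(j+1)) = List.range' (0+(j+1)) (cs.length-(j+1)) from by rw [Nat.zero_add],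
        List.range'_append_1,
        show (j+1) + (cs.length-(j+1)) = cs.length from by omega,
        List.range_eq_range']
  rw [hmap, hsplit, List.map_append, List.map_append, List.map_append, List.map_append]
  have p1 : List.map g (List.range' 0 i) = cs.take i := by
    rw [List.map_congr_left (g := fun t => cs.getD t ' ')
      (by intro t ht; rw [List.mem_range'_1] at ht; simp only [hg]
          rw [if_neg (by omega), if_neg (by omega)])]
    rw [pvMapSeg cs i 0 (by omega), List.drop_zero]
  have p2 : List.map g (List.range' i 1) = [cs.getD j ' '] := by
    rw [List.range'_one, List.map_cons, List.map_nil, hg]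
    simp
  have p3 : List.map g (List.range' (i+1) (j-(i+1))) = (cs.drop (i+1)).take (j-(i+1)) := by
    rw [List.map_congr_left (g := fun t => cs.getD t ' ')
      (by intro t ht; rw [List.mem_range'_1] at ht; simp only [hg]
          rw [if_neg (by omega), if_neg (by omega)])]
    exact pvMapSeg cs (j-(i+1)) (i+1) (by omega)
  have p4 : List.map g (List.range' j 1) = [cs.getD i ' '] := by
    rw [List.range'_one, List.map_cons, List.map_nil]
    have hgj : g j = cs.getD i ' ' := by
      simp only [hg]
      rw [if_neg (by omega)]
      simp
    rw [hgj]
  have p5 : List.map g (List.range' (j+1) (cs.length-(j+1))) = cs.drop (j+1) := by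
    rw [List.map_congr_left (g := fun t => cs.getD t ' ')
      (by intro t ht; rw [List.mem_range'_1] at ht; simp only [hg]
          rw [if_neg (by omega), if_neg (by omega)])]
    rw [pvMapSeg cs (cs.length-(j+1)) (j+1) (by omega)]
    exact List.take_of_length_le (by simp)
  rw [p1, p2, p3, p4, p5]

theorem tran_eq (s : String) : tran s = tran_alt s := by
  have harr := pvArr_gen s.toList s.toList 0 [] (by simp)
  rw [List.nil_append] at harr
  rcases pvFirstDig_spec s.toList 0 with ⟨hd0, hf⟩ | ⟨i, rest, hd0, hf, -, hlt, hrest⟩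
  · have hA : tran s = s := by
      simp only [tran]
      rw [show (List.range s.toList.length) = List.range' 0 s.toList.length from List.range_eq_range', harr, hd0]
      simp
    have hB : tran_alt s = s := by
      simp only [tran_alt]
      rw [hf]
      have hdrop : s.toList.drop (0 + s.toList.length + 1) = [] := List.drop_of_length_le (by omega)
      rw [hdrop]
      simp [pvScan2]
    rw [hA, hB]
  · rw [Nat.sub_zero] at hlt hrest
    rcases pvScan2_spec (s.toList.drop (i+1)) (i+1) false with ⟨h1, h2⟩ | ⟨j, rest2, h1, hkj, h2⟩
    · have hrest' : rest = [] := by rw [← hrest, h1]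
      have hA : tran s = s := by
        simp only [tran]
        rw [show (List.range s.toList.length) = List.range' 0 s.toList.length from List.range_eq_range', harr, hd0, hrest']
        simp
      have hB : tran_alt s = s := by
        simp only [tran_alt]
        rw [hf, h2]
        simp only [List.length_drop]
        rw [if_pos (by omega)]
      rw [hA, hB]
    · have hrest' : rest = j :: rest2 := by rw [← hrest, h1]
      have hjmem : j ∈ pvDIdx (s.toList.drop (i+1)) (i+1) := by rw [h1]; exact List.mem_cons_self
      have hjb := pvDIdx_mem hjmem
      rw [List.length_drop] at hjb
      have hji : i + 1 ≤ j := hjb.1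
      have hjlen : j < s.toList.length := by omega
      have hseg := pvRange'_any s.toList (i+1) (j-(i+1)) (by omega)
      simp only [tran]
      rw [show (List.range s.toList.length) = List.range' 0 s.toList.length from List.range_eq_range', harr, hd0, hrest']
      rw [if_neg (by simp)]
      simp only [List.getD_cons_zero, List.getD_cons_succ]
      rw [hseg]
      simp only [tran_alt]
      rw [hf, h2]
      simp only [Bool.false_or]
      rw [if_neg (show ¬ (s.toList.length ≤ j) by omega)]
      by_cases hany : ((List.take (j-(i+1)) (List.drop (i+1) s.toList)).any pvIsLet) = true
      · rw [if_pos hany, if_pos hany, pvChange_eq s.toList i j (by omega) hjlen]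
      · rw [if_neg hany, if_neg hany]


-- ===== VERDICT (by name: the statement is the Claim_ definition above) =====
theorem tran_spec : Claim_equal_tran := by
  intro s _
  unfold Spec_tran
  exact tran_eq s
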